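-- pv_equiv track=rewrite | github.com/pypi-data/pypi-mirror-397 | packages/bermuda-ledger/bermuda_ledger-2.1.29-py3-none-any.whl/bermuda/utils/summarize.py | _details_gcd
-- ===== SOURCE A (Python) =====
-- from typing import Any, Callable, Literal, Optional, get_args
--
-- def _details_gcd(dicts: list[dict[str, Any]]) -> dict[str, Any]:
--     # Find the keys that are present in all of the dicts
--     common_keys = set(dicts[0].keys())
--     for dct in dicts[1:]:
--         common_keys &= set(dct.keys())
--
--     # Check if those keys have the same values in all of the dicts
--     common_values = {}
--     for key in common_keys:
--         first_value = dicts[0][key]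
--         consistent_value = True
--         for dct in dicts[1:]:
--             if dct[key] != first_value:
--                 consistent_value = False
--                 break
--         if consistent_value and first_value is not None:
--             common_values[key] = first_value
--
--     return common_values
-- ===== SOURCE B (Python) =====
-- def _details_gcd(dicts: list) -> dict:
--     # Successive refinement: start from the first dict as the candidate agreement,
--     # and against each subsequent dict drop every candidate entry it contradicts
--     # (missing key or different value). Finally drop None values.
--     common = dict(dicts[0])
--     for d in dicts[1:]:
--         common = {k: v for k, v in common.items() if k in d and d[k] == v}
--     return {k: v for k, v in common.items() if v is not None}
-- ===== Notes on version B (the rewrite author's own statement) =====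
-- stated objective: alternative
-- what changed: B replaces A's key-set intersection followed by a per-key rescan of all dicts by a successive-refinement fold: it walks the dicts once, each step filtering the surviving candidate dict against the next dict, so no key set and no inner scan over all dicts per key exists.
-- outside the precondition, e.g. on _details_gcd([]): A raises IndexError, B raises IndexError
import Mathlib
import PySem

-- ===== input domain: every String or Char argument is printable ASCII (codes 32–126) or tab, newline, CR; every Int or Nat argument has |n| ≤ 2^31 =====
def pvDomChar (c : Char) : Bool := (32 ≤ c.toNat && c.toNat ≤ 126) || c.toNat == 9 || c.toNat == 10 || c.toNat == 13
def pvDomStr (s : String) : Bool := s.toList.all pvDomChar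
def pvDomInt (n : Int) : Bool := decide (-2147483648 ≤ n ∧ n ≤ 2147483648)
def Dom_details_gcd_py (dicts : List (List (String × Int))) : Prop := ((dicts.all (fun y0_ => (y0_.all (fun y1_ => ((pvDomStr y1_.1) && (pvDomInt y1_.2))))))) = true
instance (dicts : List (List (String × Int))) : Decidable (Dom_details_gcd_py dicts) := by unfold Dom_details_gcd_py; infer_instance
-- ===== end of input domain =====

-- B replaces A's key-set intersection plus per-key rescan by a successive-refinement fold
-- over the dicts that filters a shrinking candidate dict; equal return values
-- (dicts compared as key→value maps).

-- shared helper: d[key] as first-match lookup on the association list (none = KeyError)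
def pvLookup (d : List (String × Int)) (k : String) : Option Int :=
  (d.find? (fun p => p.1 == k)).map (·.2)

-- ===== PORT A =====
-- body of A's 'for key in common_keys' loop: first_value = dicts[0][key]; inner loop over
-- dicts[1:] with break = .all; 'first_value is not None' is always true here (values are Int);
-- 'common_values[key] = first_value' appends: keys drawn from a set are distinct
def pvABody (d0 : List (String × Int)) (tl : List (List (String × Int)))
    (acc : List (String × Int)) (key : String) : List (String × Int) :=
  match pvLookup d0 key with
  | none => acc  -- unreachable: key ∈ common_keys, so dicts[0][key] exists
  | some firstValue =>
    if tl.all (fun dct => pvLookup dct key == some firstValue) then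
      acc ++ [(key, firstValue)]
    else acc

def details_gcd_py (dicts : List (List (String × Int))) : List (String × Int) :=
  let d0 := dicts.headD []
  -- common_keys = set(dicts[0].keys()); for dct in dicts[1:]: common_keys &= set(dct.keys())
  let commonKeys : PySem.Set String :=
    dicts.tail.foldl (fun s dct => PySem.Set.inter s (PySem.Set.ofList (dct.map (·.1))))
      (PySem.Set.ofList (d0.map (·.1)))
  commonKeys.foldl (pvABody d0 dicts.tail) []

-- ===== PORT B =====
def details_gcd_py_alt (dicts : List (List (String × Int))) : List (String × Int) :=
  -- common = dict(dicts[0]); for d in dicts[1:]: keep entries d agrees with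
  -- ('k in d and d[k] == v' is 'lookup = some v'); the final 'v is not None'
  -- filter is the identity here, since the values are Int and never None
  dicts.tail.foldl
    (fun common d => common.filter (fun p => pvLookup d p.1 == some p.2))
    (dicts.headD [])

-- ===== PRECONDITION & SPEC =====
-- Pre_ excludes the empty list, on which A raises IndexError, and association lists with a
-- duplicated key inside one dict, which do not represent any Python dict (dict construction
-- collapses duplicates, so no behaviour of A is specified for them).
def Pre_details_gcd_py (dicts : List (List (String × Int))) : Prop :=
  dicts ≠ [] ∧ ∀ d ∈ dicts, (d.map (·.1)).Nodup
instance (dicts : List (List (String × Int))) : Decidable (Pre_details_gcd_py dicts) := by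
  unfold Pre_details_gcd_py; infer_instance

def pvWitness_details_gcd_py : (List (List (String × Int))) :=
  [[("a", 1), ("b", 2)], [("a", 1), ("c", 3)]]

def Spec_details_gcd_py (dicts : List (List (String × Int))) (out : List (String × Int)) : Prop := out = details_gcd_py_alt dicts
instance (dicts : List (List (String × Int))) (out : List (String × Int)) : Decidable (Spec_details_gcd_py dicts out) := by unfold Spec_details_gcd_py; infer_instance

-- ===== CLAIM (what is proved, stated in full; the proofs are below) =====
def Claim_equal_details_gcd_py : Prop := ∀ (dicts : List (List (String × Int))), Dom_details_gcd_py dicts → Pre_details_gcd_py dicts → Spec_details_gcd_py dicts (details_gcd_py dicts)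

-- ===== LEMMAS AND PROOFS =====

-- what A's loop body keeps for one key, as an Option
def pvAKeep (d0 : List (String × Int)) (tl : List (List (String × Int)))
    (key : String) : Option (String × Int) :=
  match pvLookup d0 key with
  | none => none
  | some firstValue =>
    if tl.all (fun dct => pvLookup dct key == some firstValue) then
      some (key, firstValue)
    else none

theorem filterMap_ite_eq_filter {α : Type} (l : List α) (p : α → Bool) :
    l.filterMap (fun x => if p x then some x else none) = l.filter p := by
  rw [← List.filterMap_eq_filter]
  apply List.filterMap_congr
  intro x _
  simp [Option.guard]

-- A's intersection loop is one filter by membership in every later dict's key list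
theorem foldl_inter_eq_filter (rest : List (List (String × Int))) (s : List String) :
    rest.foldl (fun s dct => PySem.Set.inter s (PySem.Set.ofList (dct.map (·.1)))) s
      = s.filter (fun k => rest.all (fun d => (d.map (·.1)).contains k)) := by
  induction rest generalizing s with
  | nil => simp
  | cons d rest ih =>
    rw [List.foldl_cons, ih]
    show (List.filter _ (PySem.Set.inter s _)) = _
    rw [PySem.Set.inter, List.filter_filter]
    apply List.filter_congr
    intro k _
    simp only [List.all_cons, PySem.Set.contains, List.contains_eq_mem]
    rw [decide_eq_decide.mpr (PySem.Set.mem_ofList (List.map (fun x => x.1) d) k)]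
    exact Bool.and_comm _ _

-- A's accumulation loop is a filterMap
theorem foldl_acc_eq_filterMap (d0 : List (String × Int)) (rest : List (List (String × Int)))
    (l : List String) (init : List (String × Int)) :
    l.foldl (pvABody d0 rest) init = init ++ l.filterMap (pvAKeep d0 rest) := by
  induction l generalizing init with
  | nil => simp
  | cons k l ih =>
    rw [List.foldl_cons, List.filterMap_cons]
    cases h : pvLookup d0 k with
    | none => simp only [pvABody, pvAKeep, h, ih]
    | some v =>
      by_cases hc : (rest.all fun dct => pvLookup dct k == some v) = true
      · simp [pvABody, pvAKeep, h, hc, ih]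
      · simp [pvABody, pvAKeep, h, hc, ih]

-- B's refinement fold is one filter by agreement with every later dict
theorem foldl_filter_eq_filter_all (rest : List (List (String × Int)))
    (init : List (String × Int)) :
    rest.foldl (fun common d => common.filter (fun p => pvLookup d p.1 == some p.2)) init
      = init.filter (fun p => rest.all (fun d => pvLookup d p.1 == some p.2)) := by
  induction rest generalizing init with
  | nil => simp
  | cons d rest ih =>
    rw [List.foldl_cons, ih, List.filter_filter]
    apply List.filter_congr
    intro p _
    simp only [List.all_cons]
    exact Bool.and_comm _ _

theorem lookup_self (d0 : List (String × Int)) (h : (d0.map (·.1)).Nodup)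
    (p : String × Int) (hp : p ∈ d0) : pvLookup d0 p.1 = some p.2 := by
  induction d0 with
  | nil => cases hp
  | cons q d ih =>
    simp only [List.map_cons, List.nodup_cons] at h
    rcases List.mem_cons.mp hp with rfl | hmem
    · simp [pvLookup]
    · by_cases he : q.1 = p.1
      · exact absurd (he ▸ List.mem_map_of_mem hmem) h.1
      · have hb : (q.1 == p.1) = false := by simpa using he
        simp only [pvLookup, List.find?_cons, hb]
        simpa [pvLookup] using ih h.2 hmem

-- a successful lookup pins down the pair that is in the dict
theorem pair_mem_of_lookup {d : List (String × Int)} {k : String} {v : Int}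
    (h : pvLookup d k = some v) : (k, v) ∈ d := by
  simp only [pvLookup, Option.map_eq_some_iff] at h
  obtain ⟨q, hq1, hq2⟩ := h
  have hmem := List.mem_of_find?_eq_some hq1
  have hb : (q.1 == k) = true := by simpa using List.find?_some hq1
  have : q = (k, v) := by
    obtain ⟨a, b⟩ := q
    simp only at hq2
    simp only [beq_iff_eq] at hb
    simp [hb, hq2]
  exact this ▸ hmem

-- ===== VERDICT (by name: the statement is the Claim_ definition above) =====
theorem details_gcd_py_spec : Claim_equal_details_gcd_py := by
  intro dicts _ hpre
  obtain ⟨hne, hnd⟩ := hpre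
  cases dicts with
  | nil => exact absurd rfl hne
  | cons d0 rest =>
    have h0 : (d0.map (·.1)).Nodup := hnd d0 (List.mem_cons_self ..)
    show details_gcd_py (d0 :: rest) = details_gcd_py_alt (d0 :: rest)
    unfold details_gcd_py details_gcd_py_alt
    simp only [List.headD_cons, List.tail_cons]
    rw [foldl_inter_eq_filter, PySem.Set.ofList_eq_self_of_nodup _ h0,
        foldl_acc_eq_filterMap, List.nil_append, List.filter_map,
        List.filterMap_map, List.filterMap_filter, foldl_filter_eq_filter_all,
        ← filterMap_ite_eq_filter d0 (fun p => rest.all fun d => pvLookup d p.1 == some p.2)]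
    apply List.filterMap_congr
    intro p hp
    have hl := lookup_self d0 h0 p hp
    simp only [Function.comp, pvAKeep, hl]
    by_cases hq : (rest.all fun dct => pvLookup dct p.1 == some p.2) = true
    · simp [hq]
      intro d hd
      have h1 : pvLookup d p.1 = some p.2 := by simpa using List.all_eq_true.mp hq d hd
      exact ⟨p.2, pair_mem_of_lookup h1⟩
    · simp [hq]
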